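-- pv_equiv track=rewrite | github.com/p3bble123/two-leetcode-per-day | SWExpertAcademy/1220-magnetic/1220-magnetic.py | findDeadlocks
-- ===== SOURCE A (Python) =====
-- def findDeadlocks(test):
--     deadlocks = 0
--
--     for col in range(len(test[0])):
--         northFirst, southSecond = False, False
--
--         for row in range(len(test)):
--             if test[row][col] == 1:
--                 northFirst = True
--             if northFirst and test[row][col] == 2:
--                 deadlocks += 1
--                 northFirst, southSecond = False, False
--
--     return deadlocks
-- ===== SOURCE B (Python) =====
-- def findDeadlocks(test):
--     deadlocks = 0
--     for col in range(len(test[0])):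
--         ms = [test[row][col] for row in range(len(test)) if test[row][col] in (1, 2)]
--         deadlocks += sum(1 for a, b in zip(ms, ms[1:]) if a == 1 and b == 2)
--     return deadlocks
-- ===== Notes on version B (the rewrite author's own statement) =====
-- stated objective: alternative
-- what changed: Replaced the armed/disarmed state-flag scan per column by a two-phase computation: filter each column to its magnets (values 1 and 2) and count adjacent (1,2) pairs in that subsequence.
import Mathlib
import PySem

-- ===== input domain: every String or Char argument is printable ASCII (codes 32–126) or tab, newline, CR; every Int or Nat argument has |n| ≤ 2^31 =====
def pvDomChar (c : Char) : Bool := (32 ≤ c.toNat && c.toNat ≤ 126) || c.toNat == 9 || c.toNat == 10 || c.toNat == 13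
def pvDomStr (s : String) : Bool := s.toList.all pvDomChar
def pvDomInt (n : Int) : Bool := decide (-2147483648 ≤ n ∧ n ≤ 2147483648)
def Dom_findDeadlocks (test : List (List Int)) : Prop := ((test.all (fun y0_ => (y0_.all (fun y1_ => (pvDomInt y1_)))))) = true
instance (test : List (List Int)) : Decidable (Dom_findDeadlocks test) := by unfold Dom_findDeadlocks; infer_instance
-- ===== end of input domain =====

-- B replaces A's armed-flag column scan by "filter the column to its magnets, count adjacent (1,2) pairs";
-- same cost, different decomposition (objective: alternative).

-- ===== PORT A =====
-- one iteration of A's inner row loop; state = (deadlocks, northFirst, southSecond)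
def pvAStep (test : List (List Int)) (col : Int) (st : Int × Bool × Bool) (row : Int) : Int × Bool × Bool :=
  let v := (PySem.List.pyGet? ((PySem.List.pyGet? test row).getD []) col).getD 0
  let st := if v = 1 then (st.1, true, st.2.2) else st
  if st.2.1 ∧ v = 2 then (st.1 + 1, false, false) else st

def findDeadlocks (test : List (List Int)) : Int :=
  (PySem.List.pyRange 0 (((PySem.List.pyGet? test 0).getD []).length : Int) 1).foldl
    (fun deadlocks col =>
      ((PySem.List.pyRange 0 (test.length : Int) 1).foldl (pvAStep test col)
        (deadlocks, false, false)).1)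
    0

-- ===== PORT B =====
def findDeadlocks_alt (test : List (List Int)) : Int :=
  (PySem.List.pyRange 0 (((PySem.List.pyGet? test 0).getD []).length : Int) 1).foldl
    (fun deadlocks col =>
      let ms := ((PySem.List.pyRange 0 (test.length : Int) 1).map
            (fun row => (PySem.List.pyGet? ((PySem.List.pyGet? test row).getD []) col).getD 0)).filter
          (fun v => v = 1 ∨ v = 2)
      -- ms[1:] = ms.drop 1 (slice from 1); sum of 1 over matching pairs = countP
      deadlocks + (((ms.zip (ms.drop 1)).countP (fun ab => ab.1 = 1 ∧ ab.2 = 2) : Nat) : Int))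
    0

-- ===== PRECONDITION & SPEC =====
-- Pre_ excludes exactly the inputs where Python A raises IndexError: the empty grid (test[0])
-- and grids with a row shorter than the first row (test[row][col] out of range).
def Pre_findDeadlocks (test : List (List Int)) : Prop :=
  test ≠ [] ∧ ∀ r ∈ test, (test.headD []).length ≤ r.length
instance (test : List (List Int)) : Decidable (Pre_findDeadlocks test) := by
  unfold Pre_findDeadlocks; infer_instance
def pvWitness_findDeadlocks : List (List Int) := [[1, 0], [2, 2]]
def Spec_findDeadlocks (test : List (List Int)) (out : Int) : Prop := out = findDeadlocks_alt test
instance (test : List (List Int)) (out : Int) : Decidable (Spec_findDeadlocks test out) := by unfold Spec_findDeadlocks; infer_instance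

-- ===== CLAIM (what is proved, stated in full; the proofs are below) =====
def Claim_equal_findDeadlocks : Prop := ∀ (test : List (List Int)), Dom_findDeadlocks test → Pre_findDeadlocks test → Spec_findDeadlocks test (findDeadlocks test)

-- ===== LEMMAS AND PROOFS =====

-- proof-side recursive adjacent-(1,2)-pair counter
def pvPc : List Int → Int
  | [] => 0
  | [_] => 0
  | a :: b :: t => (if a = 1 ∧ b = 2 then 1 else 0) + pvPc (b :: t)

theorem pvPc_eq_count (l : List Int) :
    pvPc l = (((l.zip (l.drop 1)).countP (fun ab => ab.1 = 1 ∧ ab.2 = 2) : Nat) : Int) := by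
  fun_induction pvPc l with
  | case1 => simp
  | case2 a => simp
  | case3 a b t ih =>
      simp only [List.drop, List.zip_cons_cons, List.countP_cons, ih]
      by_cases h : a = 1 ∧ b = 2
      · simp [h]; ring
      · simp [h]

theorem pvPc_cons_ne_one {a : Int} (h : ¬ a = 1) (l : List Int) : pvPc (a :: l) = pvPc l := by
  cases l with
  | nil => simp [pvPc]
  | cons b t => simp [pvPc, h]

-- A's inner-loop body as a function of the column value
def pvStepV (st : Int × Bool × Bool) (v : Int) : Int × Bool × Bool :=
  let st := if v = 1 then (st.1, true, st.2.2) else st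
  if st.2.1 ∧ v = 2 then (st.1 + 1, false, false) else st

theorem pvStepV_one (d : Int) (b s2 : Bool) : pvStepV (d, b, s2) 1 = (d, true, s2) := by
  simp [pvStepV]

theorem pvStepV_two_true (d : Int) (s2 : Bool) : pvStepV (d, true, s2) 2 = (d + 1, false, false) := by
  norm_num [pvStepV]

theorem pvStepV_two_false (d : Int) (s2 : Bool) : pvStepV (d, false, s2) 2 = (d, false, s2) := by
  norm_num [pvStepV]

theorem pvStepV_other {c : Int} (h1 : ¬ c = 1) (h2 : ¬ c = 2) (d : Int) (b s2 : Bool) :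
    pvStepV (d, b, s2) c = (d, b, s2) := by
  simp [pvStepV, h1, h2]

-- A's inner loop on the column values equals pvPc of the filtered column (with a pending 1 if armed)
theorem pvInner (cs : List Int) : ∀ (d : Int) (b s2 : Bool),
    (cs.foldl pvStepV (d, b, s2)).1
    = d + pvPc ((if b then [1] else []) ++ cs.filter (fun v => v = 1 ∨ v = 2)) := by
  induction cs with
  | nil => intro d b s2; cases b <;> simp [pvPc]
  | cons c cs ih =>
      intro d b s2
      by_cases h1 : c = 1
      · subst h1
        rw [List.foldl_cons, pvStepV_one, ih d true s2]
        have hf : (1 :: cs).filter (fun v : Int => v = 1 ∨ v = 2)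
            = 1 :: cs.filter (fun v => v = 1 ∨ v = 2) := by simp
        rw [hf]
        cases b
        · simp
        · simp only [List.cons_append]
          congr 1
          cases h : cs.filter (fun v : Int => v = 1 ∨ v = 2) with
          | nil => simp [pvPc]
          | cons x t => simp [pvPc]
      · by_cases h2 : c = 2
        · subst h2
          have hf : (2 :: cs).filter (fun v : Int => v = 1 ∨ v = 2)
              = 2 :: cs.filter (fun v => v = 1 ∨ v = 2) := by simp
          have hpc2 : ∀ l : List Int, pvPc (2 :: l) = pvPc l :=
            fun l => pvPc_cons_ne_one (by norm_num) l
          have hpc12 : ∀ l : List Int, pvPc (1 :: 2 :: l) = 1 + pvPc l := by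
            intro l
            rw [show pvPc (1 :: 2 :: l) = 1 + pvPc (2 :: l) by simp [pvPc], hpc2]
          cases b
          · rw [List.foldl_cons, pvStepV_two_false, ih d false s2, hf]
            simp [hpc2]
          · rw [List.foldl_cons, pvStepV_two_true, ih (d + 1) false false, hf]
            simp [hpc12]
            ring
        · rw [List.foldl_cons, pvStepV_other h1 h2, ih d b s2]
          have hf : (c :: cs).filter (fun v : Int => v = 1 ∨ v = 2)
              = cs.filter (fun v => v = 1 ∨ v = 2) := by simp [h1, h2]
          rw [hf]

theorem pvCol_eq (test : List (List Int)) (d col : Int) :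
    ((PySem.List.pyRange 0 (test.length : Int) 1).foldl (pvAStep test col) (d, false, false)).1
    = d +
      (((let ms := ((PySem.List.pyRange 0 (test.length : Int) 1).map
            (fun row => (PySem.List.pyGet? ((PySem.List.pyGet? test row).getD []) col).getD 0)).filter
          (fun v => v = 1 ∨ v = 2);
        (ms.zip (ms.drop 1)).countP (fun ab => ab.1 = 1 ∧ ab.2 = 2)) : Nat) : Int) := by
  rw [← pvPc_eq_count]
  have hstep : (PySem.List.pyRange 0 (test.length : Int) 1).foldl (pvAStep test col) (d, false, false)
      = ((PySem.List.pyRange 0 (test.length : Int) 1).map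
          (fun row => (PySem.List.pyGet? ((PySem.List.pyGet? test row).getD []) col).getD 0)).foldl
        pvStepV (d, false, false) := by
    rw [List.foldl_map]
    rfl
  rw [hstep, pvInner]
  simp

theorem pvOuter (test : List (List Int)) (L : List Int) : ∀ d : Int,
    L.foldl
      (fun deadlocks col =>
        ((PySem.List.pyRange 0 (test.length : Int) 1).foldl (pvAStep test col)
          (deadlocks, false, false)).1) d
    = L.foldl
      (fun deadlocks col =>
        let ms := ((PySem.List.pyRange 0 (test.length : Int) 1).map
              (fun row => (PySem.List.pyGet? ((PySem.List.pyGet? test row).getD []) col).getD 0)).filter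
            (fun v => v = 1 ∨ v = 2)
        deadlocks + (((ms.zip (ms.drop 1)).countP (fun ab => ab.1 = 1 ∧ ab.2 = 2) : Nat) : Int)) d := by
  induction L with
  | nil => intro d; rfl
  | cons c l ih =>
      intro d
      simp only [List.foldl_cons]
      rw [pvCol_eq]
      exact ih _

-- ===== VERDICT (by name: the statement is the Claim_ definition above) =====
theorem findDeadlocks_spec : Claim_equal_findDeadlocks := by
  intro test _ _
  unfold Spec_findDeadlocks findDeadlocks findDeadlocks_alt
  exact pvOuter test _ 0
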